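-- pv_equiv track=rewrite | github.com/ericmerle3789/Collatz-Junction-Theorem | research_log/R171_MITM_allS.py | dp_all_sums_mod_p
-- ===== SOURCE A (Python) =====
-- def dp_all_sums_mod_p(k, S, p, top):
--     """
--     DP complete : calcule le nombre de compositions donnant chaque
--     residue mod p. Retourne un Counter.
--     """
--     from collections import Counter
--
--     coeff = [pow(3, k - 1 - j, p) for j in range(k)]
--     pow2 = [pow(2, b, p) for b in range(top + 1)]
--
--     # DP : count[last_b][residue] = nombre de compositions
--     # Pour chaque etape j, pour chaque last_b et residue
--     # Optimisation : utiliser des arrays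
--
--     # Etape 0 : placer B_0 = b pour b = 0..top
--     # count_at_b[b] = Counter des residus
--     count_at_b = {}
--     for b in range(top + 1):
--         val = (coeff[0] * pow2[b]) % p
--         count_at_b[b] = Counter({val: 1})
--
--     # B_{k-1} n'est PAS fixe a top dans cette version (on compte TOUTES les compositions)
--     # Attends, dans le Junction Theorem, B_{k-1} = S - k = top. C'est fixe.
--     # Donc le dernier terme est toujours coeff[k-1] * 2^{top}.
--
--     # Reformulons : on a k-1 termes libres (j=0..k-2) avec B_0 <= ... <= B_{k-2} <= top
--     # Plus un terme fixe : coeff[k-1] * 2^{top}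
--
--     fixed_term = (coeff[k - 1] * pow2[top]) % p
--
--     # DP sur les k-1 premiers termes
--     # Re-init pour j=0
--     count_at_b = {}
--     for b in range(top + 1):
--         val = (coeff[0] * pow2[b]) % p
--         if b not in count_at_b:
--             count_at_b[b] = Counter()
--         count_at_b[b][val] += 1
--
--     for j in range(1, k - 1):  # j=1..k-2
--         # Construire le cumul
--         cumul = Counter()
--         new_count_at_b = {}
--
--         for b in range(top + 1):
--             if b in count_at_b:
--                 cumul += count_at_b[b]
--
--             if cumul:
--                 addition = (coeff[j] * pow2[b]) % p
--                 new_counter = Counter()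
--                 for res, cnt in cumul.items():
--                     new_res = (res + addition) % p
--                     new_counter[new_res] += cnt
--                 new_count_at_b[b] = new_counter
--
--         count_at_b = new_count_at_b
--
--     # Fusionner tous les B finaux et ajouter le terme fixe
--     total = Counter()
--     for b_counter in count_at_b.values():
--         total += b_counter
--
--     # Ajouter le terme fixe
--     final = Counter()
--     for res, cnt in total.items():
--         new_res = (res + fixed_term) % p
--         final[new_res] += cnt
--
--     return final
-- ===== SOURCE B (Python) =====
-- def dp_all_sums_mod_p(k, S, p, top):
--     """
--     Transposed DP: single outer loop over b = 0..top, inner loop over the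
--     free positions j, maintaining one cumulative residue table per position.
--     cum[j] after processing b holds the residue counts of all nondecreasing
--     length-(j+1) prefixes whose last value is <= b.
--     """
--     coeff = [pow(3, k - 1 - j, p) for j in range(k)]
--     pow2 = [pow(2, b, p) for b in range(top + 1)]
--
--     fixed_term = (coeff[k - 1] * pow2[top]) % p
--
--     levels = max(k - 1, 1)
--     cum = [{} for _ in range(levels)]
--
--     for b in range(top + 1):
--         v = (coeff[0] * pow2[b]) % p
--         cum[0][v] = cum[0].get(v, 0) + 1
--         for j in range(1, k - 1):
--             a = (coeff[j] * pow2[b]) % p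
--             src = cum[j - 1]
--             tgt = cum[j]
--             for res, cnt in list(src.items()):
--                 nr = (res + a) % p
--                 tgt[nr] = tgt.get(nr, 0) + cnt
--
--     last = cum[max(k - 2, 0)]
--     out = {}
--     for res, cnt in last.items():
--         nr = (res + fixed_term) % p
--         out[nr] = out.get(nr, 0) + cnt
--     return out
-- ===== Notes on version B (the rewrite author's own statement) =====
-- stated objective: alternative
-- what changed: B transposes the DP loop nesting: instead of A's per-level pass that rebuilds a dict of per-last-value Counters (allocating a fresh shifted Counter for every (level, last-value) pair and re-merging a cumulative Counter), B makes a single outer pass over b=0..top keeping just one cumulative residue table per position, updated in place by an inner loop over positions.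
import Mathlib
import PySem

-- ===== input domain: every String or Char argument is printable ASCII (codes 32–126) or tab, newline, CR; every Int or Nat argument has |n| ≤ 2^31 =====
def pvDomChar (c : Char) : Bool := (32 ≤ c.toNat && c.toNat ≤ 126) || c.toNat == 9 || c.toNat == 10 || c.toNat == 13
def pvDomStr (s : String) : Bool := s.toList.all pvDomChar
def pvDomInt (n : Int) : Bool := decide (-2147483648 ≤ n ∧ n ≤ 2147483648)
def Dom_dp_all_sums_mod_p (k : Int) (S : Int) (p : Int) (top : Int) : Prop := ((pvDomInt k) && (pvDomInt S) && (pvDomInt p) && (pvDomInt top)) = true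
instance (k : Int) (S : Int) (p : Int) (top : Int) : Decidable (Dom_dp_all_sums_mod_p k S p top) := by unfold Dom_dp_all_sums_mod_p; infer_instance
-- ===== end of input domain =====

-- B transposes A's DP loop nesting (single pass over b with one cumulative residue
-- table per position, updated in place) instead of A's per-level rebuild of a
-- dict-of-Counters; same return value (objective: alternative decomposition).

-- shared helper: Python's  d[key] = d.get(key, 0) + v   (Counter's c[key] += v)
def pvBump (c : PySem.Dict Int Int) (key : Int) (v : Int) : PySem.Dict Int Int :=
  c.insert key (c.getD key 0 + v)

-- helper for port A: Python's  t += c  on Counters (all counts here are positive,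
-- so Counter's removal of nonpositive entries never fires and += is exactly this fold)
def pvMerge (t c : PySem.Dict Int Int) : PySem.Dict Int Int :=
  c.items.foldl (fun d kv => pvBump d kv.1 kv.2) t

-- ===== PORT A =====
def dp_all_sums_mod_p (k : Int) (S : Int) (p : Int) (top : Int) : List (Int × Int) :=
  let coeff := (PySem.List.pyRange 0 k 1).map (fun j => PySem.Int.powMod 3 (k - 1 - j).toNat p)
  let pow2 := (PySem.List.pyRange 0 (top + 1) 1).map (fun b => PySem.Int.powMod 2 b.toNat p)
  -- first count_at_b loop (its value is discarded by the Python; transliterated anyway)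
  let _count0 : PySem.Dict Int (PySem.Dict Int Int) :=
    (PySem.List.pyRange 0 (top + 1) 1).foldl (fun d b =>
      let val := PySem.Int.mod (PySem.List.pyGetD coeff 0 0 * PySem.List.pyGetD pow2 b 0) p
      d.insert b (PySem.Dict.empty.insert val 1)) PySem.Dict.empty
  let fixed_term := PySem.Int.mod (PySem.List.pyGetD coeff (k - 1) 0 * PySem.List.pyGetD pow2 top 0) p
  -- re-init for j = 0
  let count_at_b : PySem.Dict Int (PySem.Dict Int Int) :=
    (PySem.List.pyRange 0 (top + 1) 1).foldl (fun d b =>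
      d.insert b (pvBump (d.getD b PySem.Dict.empty)
        (PySem.Int.mod (PySem.List.pyGetD coeff 0 0 * PySem.List.pyGetD pow2 b 0) p) 1)) PySem.Dict.empty
  -- for j in range(1, k-1): build cumul and new_count_at_b
  let count_at_b : PySem.Dict Int (PySem.Dict Int Int) :=
    (PySem.List.pyRange 1 (k - 1) 1).foldl (fun cab j =>
      ((PySem.List.pyRange 0 (top + 1) 1).foldl
        (fun (st : PySem.Dict Int Int × PySem.Dict Int (PySem.Dict Int Int)) b =>
          let cumul := if cab.contains b = true then pvMerge st.1 (cab.getD b PySem.Dict.empty) else st.1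
          if cumul.items = [] then (cumul, st.2)
          else
            let addition := PySem.Int.mod (PySem.List.pyGetD coeff j 0 * PySem.List.pyGetD pow2 b 0) p
            let nc := cumul.items.foldl (fun nc rc => pvBump nc (PySem.Int.mod (rc.1 + addition) p) rc.2) PySem.Dict.empty
            (cumul, st.2.insert b nc))
        (PySem.Dict.empty, PySem.Dict.empty)).2) count_at_b
  -- total = sum of all per-b counters
  let total := count_at_b.values.foldl (fun t c => pvMerge t c) PySem.Dict.empty
  -- shift by the fixed term
  let final := total.items.foldl (fun f rc => pvBump f (PySem.Int.mod (rc.1 + fixed_term) p) rc.2) PySem.Dict.empty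
  final.items

-- ===== PORT B =====
def dp_all_sums_mod_p_alt (k : Int) (S : Int) (p : Int) (top : Int) : List (Int × Int) :=
  let coeff := (PySem.List.pyRange 0 k 1).map (fun j => PySem.Int.powMod 3 (k - 1 - j).toNat p)
  let pow2 := (PySem.List.pyRange 0 (top + 1) 1).map (fun b => PySem.Int.powMod 2 b.toNat p)
  let fixed_term := PySem.Int.mod (PySem.List.pyGetD coeff (k - 1) 0 * PySem.List.pyGetD pow2 top 0) p
  let levels := max (k - 1) 1
  let cum : List (PySem.Dict Int Int) := (PySem.List.pyRange 0 levels 1).map (fun _ => PySem.Dict.empty)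
  let cum := (PySem.List.pyRange 0 (top + 1) 1).foldl (fun cum b =>
    let v := PySem.Int.mod (PySem.List.pyGetD coeff 0 0 * PySem.List.pyGetD pow2 b 0) p
    let cum := PySem.List.pySetD cum 0 (pvBump (PySem.List.pyGetD cum 0 PySem.Dict.empty) v 1)
    (PySem.List.pyRange 1 (k - 1) 1).foldl (fun cum j =>
      let a := PySem.Int.mod (PySem.List.pyGetD coeff j 0 * PySem.List.pyGetD pow2 b 0) p
      let src := PySem.List.pyGetD cum (j - 1) PySem.Dict.empty
      let tgt := PySem.List.pyGetD cum j PySem.Dict.empty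
      PySem.List.pySetD cum j
        (src.items.foldl (fun tgt rc => pvBump tgt (PySem.Int.mod (rc.1 + a) p) rc.2) tgt)) cum) cum
  let last := PySem.List.pyGetD cum (max (k - 2) 0) PySem.Dict.empty
  (last.items.foldl (fun out rc => pvBump out (PySem.Int.mod (rc.1 + fixed_term) p) rc.2) PySem.Dict.empty).items

-- ===== PRECONDITION & SPEC =====
-- Pre_ excludes exactly the inputs on which the Python A raises: k ≤ 0 and top < 0
-- hit out-of-range list indexing (IndexError), p = 0 makes pow(_, _, 0) a ValueError.
def Pre_dp_all_sums_mod_p (k : Int) (S : Int) (p : Int) (top : Int) : Prop :=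
  1 ≤ k ∧ 0 ≤ top ∧ p ≠ 0
instance (k : Int) (S : Int) (p : Int) (top : Int) : Decidable (Pre_dp_all_sums_mod_p k S p top) := by unfold Pre_dp_all_sums_mod_p; infer_instance
def pvWitness_dp_all_sums_mod_p : Int × Int × Int × Int := (3, 0, 5, 2)
def Spec_dp_all_sums_mod_p (k : Int) (S : Int) (p : Int) (top : Int) (out : List (Int × Int)) : Prop := out = dp_all_sums_mod_p_alt k S p top
instance (k : Int) (S : Int) (p : Int) (top : Int) (out : List (Int × Int)) : Decidable (Spec_dp_all_sums_mod_p k S p top out) := by unfold Spec_dp_all_sums_mod_p; infer_instance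

-- ===== CLAIM (what is proved, stated in full; the proofs are below) =====
def Claim_equal_dp_all_sums_mod_p : Prop := ∀ (k : Int) (S : Int) (p : Int) (top : Int), Dom_dp_all_sums_mod_p k S p top → Pre_dp_all_sums_mod_p k S p top → Spec_dp_all_sums_mod_p k S p top (dp_all_sums_mod_p k S p top)

-- ===== LEMMAS AND PROOFS =====

-- proof-side canonical forms --------------------------------------------------

-- repeated pvBump over a pair list (the shape of every Counter-updating loop above)
def pvAct (l : List (Int × Int)) (d : PySem.Dict Int Int) : PySem.Dict Int Int :=
  l.foldl (fun d kv => pvBump d kv.1 kv.2) d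

-- item list with every key shifted by a, mod p
def pvShiftL (p a : Int) (l : List (Int × Int)) : List (Int × Int) :=
  l.map (fun rc => (PySem.Int.mod (rc.1 + a) p, rc.2))

-- reference tables: pvTF p w j b = residue counter of one cell (level j, last value b);
-- pvCF p w j t = cumulative counter of level j over b < t
def pvTF (p : Int) (w : Int → Int → Int) : Nat → Int → PySem.Dict Int Int
  | 0, b => pvBump PySem.Dict.empty (w 0 b) 1
  | (j+1), b => pvAct (pvShiftL p (w ((j : Int) + 1) b)
      (((PySem.List.pyRange 0 (b + 1) 1).foldl (fun d b' => pvMerge d (pvTF p w j b')) PySem.Dict.empty).items))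
      PySem.Dict.empty

def pvCF (p : Int) (w : Int → Int → Int) (j : Nat) (t : Int) : PySem.Dict Int Int :=
  (PySem.List.pyRange 0 t 1).foldl (fun d b => pvMerge d (pvTF p w j b)) PySem.Dict.empty

lemma pvTF_succ (p : Int) (w : Int → Int → Int) (j : Nat) (b : Int) :
    pvTF p w (j+1) b = pvAct (pvShiftL p (w ((j : Int) + 1) b) (pvCF p w j (b + 1)).items) PySem.Dict.empty := rfl


-- basic dict facts -----------------------------------------------------------

lemma pvBump_items_ne_nil (d : PySem.Dict Int Int) (key v : Int) : (pvBump d key v).items ≠ [] := by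
  unfold pvBump
  by_cases hc : d.contains key = true
  · rw [PySem.Dict.items_insert_of_contains d _ hc]
    have hk : key ∈ d.keys := (PySem.Dict.contains_iff_mem_keys d key).mp hc
    have : d.items ≠ [] := by
      intro h
      have : d.keys = [] := by simp [PySem.Dict.keys, h]
      simp [this] at hk
    simpa using this
  · rw [PySem.Dict.items_insert_of_not_contains d _ (by simpa using hc)]
    simp

lemma pvAct_ne_nil (l : List (Int × Int)) (d : PySem.Dict Int Int)
    (h : d.items ≠ [] ∨ l ≠ []) : (pvAct l d).items ≠ [] := by
  induction l generalizing d with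
  | nil => simpa [pvAct] using h.resolve_right (by simp)
  | cons x xs ih =>
      show (pvAct xs (pvBump d x.1 x.2)).items ≠ []
      exact ih _ (Or.inl (pvBump_items_ne_nil _ _ _))


lemma pv_map_noop (l : List (Int × Int)) (key b : Int) (h : ∀ p ∈ l, p.1 ≠ key) :
    l.map (fun p => if (p.1 == key) = true then (key, b) else p) = l := by
  induction l with
  | nil => rfl
  | cons x xs ih =>
      simp only [List.map_cons, List.cons.injEq]
      exact ⟨by simp [h x List.mem_cons_self], ih (fun p hp => h p (List.mem_cons_of_mem _ hp))⟩

lemma pv_insert_insert_same (u : PySem.Dict Int Int) (key a b : Int) :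
    (u.insert key a).insert key b = u.insert key b := by
  apply PySem.Dict.ext
  by_cases hc : u.contains key = true
  · have hc' : (u.insert key a).contains key = true := by
      simp [PySem.Dict.contains_insert]
    rw [PySem.Dict.items_insert_of_contains _ _ hc',
        PySem.Dict.items_insert_of_contains _ _ hc,
        PySem.Dict.items_insert_of_contains _ _ hc, List.map_map]
    apply List.map_congr_left
    intro p _
    by_cases hp : p.1 = key <;> simp [hp]
  · have hcf : u.contains key = false := by simpa using hc
    have hc' : (u.insert key a).contains key = true := by
      simp [PySem.Dict.contains_insert]
    rw [PySem.Dict.items_insert_of_contains _ _ hc',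
        PySem.Dict.items_insert_of_not_contains _ _ hcf,
        PySem.Dict.items_insert_of_not_contains _ _ hcf, List.map_append]
    have hmem : ∀ p ∈ u.items, p.1 ≠ key := by
      intro p hp hkey
      have : key ∈ u.keys := by
        simp only [PySem.Dict.keys]
        exact hkey ▸ List.mem_map_of_mem hp
      exact absurd ((PySem.Dict.contains_iff_mem_keys u key).mpr this) (by simp [hcf])
    rw [pv_map_noop u.items key b hmem]
    simp

lemma pv_insert_comm (u : PySem.Dict Int Int) (key q : Int) (hq : q ≠ key)
    (hk : key ∈ u.keys) (w x : Int) :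
    (u.insert key w).insert q x = (u.insert q x).insert key w := by
  apply PySem.Dict.ext
  have hck : u.contains key = true := (PySem.Dict.contains_iff_mem_keys u key).mpr hk
  by_cases hcq : u.contains q = true
  · have h1 : (u.insert key w).contains q = true := by
      simp [PySem.Dict.contains_insert, hcq]
    have h2 : (u.insert q x).contains key = true := by
      simp [PySem.Dict.contains_insert, hck]
    rw [PySem.Dict.items_insert_of_contains _ _ h1,
        PySem.Dict.items_insert_of_contains _ _ hck,
        PySem.Dict.items_insert_of_contains _ _ h2,
        PySem.Dict.items_insert_of_contains _ _ hcq, List.map_map, List.map_map]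
    apply List.map_congr_left
    intro p _
    by_cases hp : p.1 = key
    · simp [hp, hq, Ne.symm hq]
    · by_cases hpq : p.1 = q <;> simp [hp, hpq, hq]
  · have hcqf : u.contains q = false := by simpa using hcq
    have h1 : (u.insert key w).contains q = false := by
      simp [PySem.Dict.contains_insert, hcqf]
      exact fun h => absurd h hq
    have h2 : (u.insert q x).contains key = true := by
      simp [PySem.Dict.contains_insert, hck]
    rw [PySem.Dict.items_insert_of_not_contains _ _ h1,
        PySem.Dict.items_insert_of_contains _ _ hck,
        PySem.Dict.items_insert_of_contains _ _ h2,
        PySem.Dict.items_insert_of_not_contains _ _ hcqf, List.map_append]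
    simp [hq]

lemma pv_getD_act_of_ne (l : List (Int × Int)) (key : Int) (hl : ∀ q ∈ l, q.1 ≠ key)
    (d : PySem.Dict Int Int) : (pvAct l d).getD key 0 = d.getD key 0 := by
  induction l generalizing d with
  | nil => rfl
  | cons x xs ih =>
      show (pvAct xs (pvBump d x.1 x.2)).getD key 0 = _
      rw [ih (fun q hq => hl q (List.mem_cons_of_mem _ hq)) _]
      exact PySem.Dict.getD_insert_of_ne d _ _ (Ne.symm (hl x List.mem_cons_self))

lemma pv_act_insert (l : List (Int × Int)) (key : Int) (hl : ∀ q ∈ l, q.1 ≠ key)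
    (d : PySem.Dict Int Int) (hk : key ∈ d.keys) (w : Int) :
    pvAct l (d.insert key w) = (pvAct l d).insert key w := by
  induction l generalizing d with
  | nil => rfl
  | cons x xs ih =>
      have hx : x.1 ≠ key := hl x List.mem_cons_self
      show pvAct xs (pvBump (d.insert key w) x.1 x.2) = (pvAct xs (pvBump d x.1 x.2)).insert key w
      have h1 : pvBump (d.insert key w) x.1 x.2 = (pvBump d x.1 x.2).insert key w := by
        unfold pvBump
        rw [PySem.Dict.getD_insert_of_ne d _ _ hx]
        exact pv_insert_comm d key x.1 hx hk _ _
      rw [h1, ih (fun q hq => hl q (List.mem_cons_of_mem _ hq)) _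
            (by unfold pvBump; rw [PySem.Dict.mem_keys_insert]; exact Or.inr hk)]

-- the crux: folding the items of (bump c key v) equals folding c's items then bumping
lemma pv_act_bump (c : PySem.Dict Int Int) (hnd : c.keys.Nodup) (key v : Int)
    (t : PySem.Dict Int Int) :
    pvAct (pvBump c key v).items t = pvBump (pvAct c.items t) key v := by
  by_cases hc : c.contains key = true
  · -- key present: decompose items around it
    have hk : key ∈ c.keys := (PySem.Dict.contains_iff_mem_keys c key).mp hc
    have : ∃ old, (key, old) ∈ c.items := by
      simp only [PySem.Dict.keys] at hk
      obtain ⟨p, hp, hp1⟩ := List.mem_map.mp hk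
      exact ⟨p.2, by simpa [← hp1] using hp⟩
    obtain ⟨old, hmem⟩ := this
    obtain ⟨pre, post, hsplit⟩ := List.append_of_mem hmem
    have hkeys : c.keys = pre.map (·.1) ++ key :: post.map (·.1) := by
      simp [PySem.Dict.keys, hsplit]
    have hpre : ∀ q ∈ pre, q.1 ≠ key := by
      intro q hq
      have := hkeys ▸ hnd
      rw [List.nodup_append] at this
      exact fun h => (this.2.2 _ (List.mem_map_of_mem hq) key (by simp)) (by simp [h])
    have hpost : ∀ q ∈ post, q.1 ≠ key := by
      intro q hq
      have := hkeys ▸ hnd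
      rw [List.nodup_append] at this
      have h2 := this.2.1
      rw [List.nodup_cons] at h2
      exact fun h => h2.1 (h ▸ List.mem_map_of_mem hq)
    have hgetD : c.getD key 0 = old := PySem.Dict.getD_of_mem_items c hmem hnd 0
    have hitems : (pvBump c key v).items = pre ++ (key, old + v) :: post := by
      unfold pvBump
      rw [PySem.Dict.items_insert_of_contains _ _ hc, hsplit, hgetD]
      rw [List.map_append, List.map_cons,
          pv_map_noop pre key _ hpre, pv_map_noop post key _ hpost]
      simp [hgetD]
    rw [hitems, hsplit]
    have hActSplit : ∀ (mid : Int × Int), pvAct (pre ++ mid :: post) t = pvAct post (pvBump (pvAct pre t) mid.1 mid.2) := by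
      intro mid
      unfold pvAct
      rw [List.foldl_append, List.foldl_cons]
    rw [hActSplit (key, old + v), hActSplit (key, old)]
    set u := pvAct pre t with hu
    show pvAct post (pvBump u key (old + v)) = pvBump (pvAct post (pvBump u key old)) key v
    have e1 : pvBump u key (old + v) = (pvBump u key old).insert key (u.getD key 0 + (old + v)) := by
      unfold pvBump; rw [pv_insert_insert_same]
    have hkmem : key ∈ (pvBump u key old).keys := by
      unfold pvBump; rw [PySem.Dict.mem_keys_insert]; exact Or.inl rfl
    rw [e1, pv_act_insert post key hpost _ hkmem]
    show _ = (pvAct post (pvBump u key old)).insert key ((pvAct post (pvBump u key old)).getD key 0 + v)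
    rw [pv_getD_act_of_ne post key hpost]
    show _ = (pvAct post (pvBump u key old)).insert key ((pvBump u key old).getD key 0 + v)
    unfold pvBump
    rw [PySem.Dict.getD_insert_self]
    congr 1
    ring
  · -- key absent: bump appends
    have hcf : c.contains key = false := by simpa using hc
    have hitems : (pvBump c key v).items = c.items ++ [(key, 0 + v)] := by
      unfold pvBump
      rw [PySem.Dict.getD_of_not_contains _ _ hcf,
          PySem.Dict.items_insert_of_not_contains _ _ hcf]
    rw [hitems]
    unfold pvAct
    rw [List.foldl_append]
    show pvBump (pvAct c.items t) key (0 + v) = pvBump (pvAct c.items t) key v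
    norm_num

lemma pv_act_nodup_keys (l : List (Int × Int)) (d : PySem.Dict Int Int)
    (h : d.keys.Nodup) : (pvAct l d).keys.Nodup := by
  unfold pvAct pvBump
  exact PySem.Dict.nodup_keys_foldl_insert_key l Prod.fst (fun d kv => d.getD kv.1 0 + kv.2) d h

-- merging the counter built from l into t = adding l's entries into t directly
lemma pv_merge_counter (l : List (Int × Int)) (t : PySem.Dict Int Int) :
    pvMerge t (pvAct l PySem.Dict.empty) = pvAct l t := by
  induction l using List.reverseRecOn with
  | nil => rfl
  | append_singleton xs x ih =>
      have h1 : pvAct (xs ++ [x]) PySem.Dict.empty = pvBump (pvAct xs PySem.Dict.empty) x.1 x.2 := by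
        unfold pvAct; rw [List.foldl_append]; rfl
      have h2 : ∀ (u : PySem.Dict Int Int), pvAct (xs ++ [x]) u = pvBump (pvAct xs u) x.1 x.2 := by
        intro u; unfold pvAct; rw [List.foldl_append]; rfl
      rw [h1, h2]
      show pvAct (pvBump (pvAct xs PySem.Dict.empty) x.1 x.2).items t = _
      rw [pv_act_bump _ (pv_act_nodup_keys xs _ PySem.Dict.nodup_keys_empty) x.1 x.2 t]
      rw [show pvAct (pvAct xs PySem.Dict.empty).items t = pvMerge t (pvAct xs PySem.Dict.empty) from rfl, ih]

-- nonemptiness of the reference tables ---------------------------------------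

lemma pvCF_succ (p : Int) (w : Int → Int → Int) (j : Nat) (b : Int) (hb : 0 ≤ b) :
    pvCF p w j (b + 1) = pvMerge (pvCF p w j b) (pvTF p w j b) := by
  unfold pvCF
  rw [PySem.List.pyRange_one_succ_right hb, List.foldl_append]
  rfl

lemma pvTF_ne_nil (p : Int) (w : Int → Int → Int) (j : Nat) (b : Int) (hb : 0 ≤ b) :
    (pvTF p w j b).items ≠ [] := by
  induction j generalizing b with
  | zero => exact pvBump_items_ne_nil _ _ _
  | succ j ih =>
      rw [pvTF_succ]
      apply pvAct_ne_nil
      right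
      rw [pvCF_succ p w j b hb]
      unfold pvShiftL
      simp only [ne_eq, List.map_eq_nil_iff]
      show ¬ (pvAct (pvTF p w j b).items (pvCF p w j b)).items = []
      exact pvAct_ne_nil _ _ (Or.inr (ih b hb))

lemma pvCF_items_ne_nil (p : Int) (w : Int → Int → Int) (j : Nat) (b : Int) (hb : 0 ≤ b) :
    (pvCF p w j (b + 1)).items ≠ [] := by
  rw [pvCF_succ p w j b hb]
  show (pvAct (pvTF p w j b).items (pvCF p w j b)).items ≠ []
  exact pvAct_ne_nil _ _ (Or.inr (pvTF_ne_nil p w j b hb))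


-- dicts whose item list is a map over distinct keys ---------------------------

lemma pv_keys_of_items_map (d : PySem.Dict Int (PySem.Dict Int Int)) (L : List Int)
    (f : Int → PySem.Dict Int Int) (h : d.items = L.map (fun b => (b, f b))) : d.keys = L := by
  simp [PySem.Dict.keys, h, Function.comp_def]

lemma pv_not_contains_of_items_map (d : PySem.Dict Int (PySem.Dict Int Int)) (L : List Int)
    (f : Int → PySem.Dict Int Int) (h : d.items = L.map (fun b => (b, f b)))
    {b : Int} (hb : b ∉ L) : d.contains b = false := by
  by_contra hc
  have : d.contains b = true := by revert hc; cases d.contains b <;> simp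
  exact hb ((pv_keys_of_items_map d L f h) ▸ (PySem.Dict.contains_iff_mem_keys d b).mp this)

lemma pv_merge_single (d : PySem.Dict Int Int) (v : Int) :
    pvMerge d (pvBump PySem.Dict.empty v 1) = pvBump d v 1 := by
  have h : (pvBump PySem.Dict.empty v 1).items = [(v, (0:Int) + 1)] := by
    unfold pvBump
    rw [PySem.Dict.getD_empty, PySem.Dict.items_insert_of_not_contains _ _ (PySem.Dict.contains_empty v)]
    rfl
  show pvAct (pvBump PySem.Dict.empty v 1).items d = _
  rw [h]
  show pvBump d v (0 + 1) = pvBump d v 1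
  norm_num

lemma pv_get_map_range {α : Type} (L : Nat) (f : Nat → α) (j : Int) (hj0 : 0 ≤ j)
    (hjL : j < (L : Int)) (d : α) :
    PySem.List.pyGetD ((List.range L).map f) j d = f j.toNat := by
  rw [PySem.List.pyGetD_eq_getElem _ d hj0 (by simpa using hjL)]
  simp

lemma pv_set_map_range {α : Type} (L : Nat) (f : Nat → α) (j : Nat) (v : α) :
    ((List.range L).map f).set j v = (List.range L).map (fun i => if i = j then v else f i) := by
  apply List.ext_getElem (by simp)
  intro i h1 h2
  simp only [List.getElem_set, List.getElem_map, List.getElem_range]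
  by_cases h3 : i = j
  · simp [h3]
  · simp [if_neg h3, if_neg (Ne.symm h3)]

-- PORT A, loop by loop --------------------------------------------------------

lemma pvA_init (w0 : Int → Int) (mN : Nat) :
    ((PySem.List.pyRange 0 (mN : Int) 1).foldl
      (fun d b => d.insert b (pvBump (d.getD b PySem.Dict.empty) (w0 b) 1)) PySem.Dict.empty).items
    = (PySem.List.pyRange 0 (mN : Int) 1).map (fun b => (b, pvBump PySem.Dict.empty (w0 b) 1)) := by
  induction mN with
  | zero =>
      simp only [Nat.cast_zero, PySem.List.pyRange_one_eq_nil (le_refl (0:Int)), List.foldl_nil, List.map_nil]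
      rfl
  | succ m ih =>
      have hcast : ((m + 1 : Nat) : Int) = (m : Int) + 1 := by push_cast; ring
      rw [hcast, PySem.List.pyRange_one_succ_right (by positivity), List.foldl_append, List.map_append]
      simp only [List.foldl_cons, List.foldl_nil, List.map_cons, List.map_nil]
      set d := (PySem.List.pyRange 0 (m : Int) 1).foldl
        (fun d b => d.insert b (pvBump (d.getD b PySem.Dict.empty) (w0 b) 1)) PySem.Dict.empty with hd
      have hnc : d.contains (m : Int) = false :=
        pv_not_contains_of_items_map d _ _ ih (by simp [PySem.List.mem_pyRange_one])
      rw [PySem.Dict.getD_of_not_contains _ _ hnc,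
          PySem.Dict.items_insert_of_not_contains _ _ hnc, ih]

lemma pvA_inner (p : Int) (w : Int → Int → Int) (jN : Nat) (top : Int)
    (cab : PySem.Dict Int (PySem.Dict Int Int))
    (hcab : ∀ b : Int, 0 ≤ b → b < top + 1 →
      cab.contains b = true ∧ cab.getD b PySem.Dict.empty = pvTF p w jN b) (j : Int)
    (hj : j = (jN : Int) + 1) :
    ∀ mN : Nat, (mN : Int) ≤ top + 1 →
    ((PySem.List.pyRange 0 (mN : Int) 1).foldl
        (fun (st : PySem.Dict Int Int × PySem.Dict Int (PySem.Dict Int Int)) b =>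
          let cumul := if cab.contains b = true then pvMerge st.1 (cab.getD b PySem.Dict.empty) else st.1
          if cumul.items = [] then (cumul, st.2)
          else
            (cumul, st.2.insert b (cumul.items.foldl
              (fun nc rc => pvBump nc (PySem.Int.mod (rc.1 + w j b) p) rc.2) PySem.Dict.empty)))
        (PySem.Dict.empty, PySem.Dict.empty)).1 = pvCF p w jN (mN : Int) ∧
    ((PySem.List.pyRange 0 (mN : Int) 1).foldl
        (fun (st : PySem.Dict Int Int × PySem.Dict Int (PySem.Dict Int Int)) b =>
          let cumul := if cab.contains b = true then pvMerge st.1 (cab.getD b PySem.Dict.empty) else st.1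
          if cumul.items = [] then (cumul, st.2)
          else
            (cumul, st.2.insert b (cumul.items.foldl
              (fun nc rc => pvBump nc (PySem.Int.mod (rc.1 + w j b) p) rc.2) PySem.Dict.empty)))
        (PySem.Dict.empty, PySem.Dict.empty)).2.items
      = (PySem.List.pyRange 0 (mN : Int) 1).map (fun b => (b, pvTF p w (jN + 1) b)) := by
  intro mN
  induction mN with
  | zero =>
      intro _
      constructor
      · simp only [Nat.cast_zero, PySem.List.pyRange_one_eq_nil (le_refl (0:Int)), List.foldl_nil]
        simp only [pvCF, PySem.List.pyRange_one_eq_nil (le_refl (0:Int)), List.foldl_nil]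
      · simp only [Nat.cast_zero, PySem.List.pyRange_one_eq_nil (le_refl (0:Int)), List.foldl_nil, List.map_nil]
        rfl
  | succ m ih =>
      intro hm
      have hm' : (m : Int) ≤ top + 1 := by push_cast at hm ⊢; omega
      have hmtop : (m : Int) < top + 1 := by push_cast at hm; omega
      have hm0 : (0 : Int) ≤ (m : Int) := by positivity
      obtain ⟨ih1, ih2⟩ := ih hm'
      have hcast : ((m + 1 : Nat) : Int) = (m : Int) + 1 := by push_cast; ring
      rw [hcast, PySem.List.pyRange_one_succ_right hm0, List.foldl_append, List.map_append]
      simp only [List.foldl_cons, List.foldl_nil, List.map_cons, List.map_nil]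
      -- one body step at b = m
      obtain ⟨hct, hgd⟩ := hcab (m : Int) hm0 hmtop
      rw [if_pos hct, hgd, ih1]
      have hcum : pvMerge (pvCF p w jN (m : Int)) (pvTF p w jN (m : Int)) = pvCF p w jN ((m : Int) + 1) :=
        (pvCF_succ p w jN (m : Int) hm0).symm
      rw [hcum]
      rw [if_neg (pvCF_items_ne_nil p w jN (m : Int) hm0)]
      have hfold : (pvCF p w jN ((m : Int) + 1)).items.foldl
          (fun nc rc => pvBump nc (PySem.Int.mod (rc.1 + w j (m : Int)) p) rc.2) PySem.Dict.empty
          = pvTF p w (jN + 1) (m : Int) := by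
        rw [pvTF_succ, hj]
        unfold pvShiftL pvAct
        rw [List.foldl_map]
      constructor
      · rfl
      · have hnc : ((PySem.List.pyRange 0 (m : Int) 1).foldl
            (fun (st : PySem.Dict Int Int × PySem.Dict Int (PySem.Dict Int Int)) b =>
              let cumul := if cab.contains b = true then pvMerge st.1 (cab.getD b PySem.Dict.empty) else st.1
              if cumul.items = [] then (cumul, st.2)
              else
                (cumul, st.2.insert b (cumul.items.foldl
                  (fun nc rc => pvBump nc (PySem.Int.mod (rc.1 + w j b) p) rc.2) PySem.Dict.empty)))
            (PySem.Dict.empty, PySem.Dict.empty)).2.contains (m : Int) = false :=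
          pv_not_contains_of_items_map _ _ _ ih2 (by simp [PySem.List.mem_pyRange_one])
        rw [hfold, PySem.Dict.items_insert_of_not_contains _ _ hnc, ih2]


lemma pvA_outer (p : Int) (w : Int → Int → Int) (top : Int) (htop : 0 ≤ top)
    (cab0 : PySem.Dict Int (PySem.Dict Int Int))
    (h0 : cab0.items = (PySem.List.pyRange 0 (top + 1) 1).map (fun b => (b, pvTF p w 0 b))) :
    ∀ jN : Nat,
    ((PySem.List.pyRange 1 (1 + (jN : Int)) 1).foldl
      (fun cab j =>
        ((PySem.List.pyRange 0 (top + 1) 1).foldl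
          (fun (st : PySem.Dict Int Int × PySem.Dict Int (PySem.Dict Int Int)) b =>
            let cumul := if cab.contains b = true then pvMerge st.1 (cab.getD b PySem.Dict.empty) else st.1
            if cumul.items = [] then (cumul, st.2)
            else
              (cumul, st.2.insert b (cumul.items.foldl
                (fun nc rc => pvBump nc (PySem.Int.mod (rc.1 + w j b) p) rc.2) PySem.Dict.empty)))
          (PySem.Dict.empty, PySem.Dict.empty)).2) cab0).items
    = (PySem.List.pyRange 0 (top + 1) 1).map (fun b => (b, pvTF p w jN b)) := by
  intro jN
  induction jN with
  | zero =>
      rw [PySem.List.pyRange_one_eq_nil (by norm_num : (1 + ((0:Nat) : Int)) ≤ 1), List.foldl_nil]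
      exact h0
  | succ n ih =>
      have hcast : (1 + ((n + 1 : Nat) : Int)) = (1 + (n : Int)) + 1 := by push_cast; ring
      rw [hcast, PySem.List.pyRange_one_succ_right (show (1:Int) ≤ 1 + (n : Int) by omega),
        List.foldl_append, List.foldl_cons, List.foldl_nil]
      set cabn := (PySem.List.pyRange 1 (1 + (n : Int)) 1).foldl
        (fun cab j =>
          ((PySem.List.pyRange 0 (top + 1) 1).foldl
            (fun (st : PySem.Dict Int Int × PySem.Dict Int (PySem.Dict Int Int)) b =>
              let cumul := if cab.contains b = true then pvMerge st.1 (cab.getD b PySem.Dict.empty) else st.1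
              if cumul.items = [] then (cumul, st.2)
              else
                (cumul, st.2.insert b (cumul.items.foldl
                  (fun nc rc => pvBump nc (PySem.Int.mod (rc.1 + w j b) p) rc.2) PySem.Dict.empty)))
            (PySem.Dict.empty, PySem.Dict.empty)).2) cab0 with hcabn
      have hkeys : cabn.keys = PySem.List.pyRange 0 (top + 1) 1 := pv_keys_of_items_map cabn _ _ ih
      have hget : ∀ b : Int, 0 ≤ b → b < top + 1 →
          cabn.contains b = true ∧ cabn.getD b PySem.Dict.empty = pvTF p w n b := by
        intro b hb0 hb1
        have hbmem : b ∈ cabn.keys := by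
          rw [hkeys, PySem.List.mem_pyRange_one]; exact ⟨hb0, hb1⟩
        refine ⟨(PySem.Dict.contains_iff_mem_keys cabn b).mpr hbmem, ?_⟩
        exact PySem.Dict.getD_of_mem_items cabn
          (by rw [ih]; exact List.mem_map_of_mem (by rw [PySem.List.mem_pyRange_one]; exact ⟨hb0, hb1⟩))
          (by rw [hkeys]; exact PySem.List.nodup_pyRange_one 0 (top + 1)) _
      have hmN : (((top + 1).toNat : Int)) = top + 1 := Int.toNat_of_nonneg (by omega)
      have := (pvA_inner p w n top cabn hget (1 + (n : Int)) (by ring)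
        ((top + 1).toNat) (by rw [hmN])).2
      rw [hmN] at this
      exact this

-- PORT B, loop by loop --------------------------------------------------------

lemma pvB_inner (p : Int) (w : Int → Int → Int) (b : Int) (hb : 0 ≤ b) (L : Nat) :
    ∀ jN : Nat, jN < L →
    (PySem.List.pyRange 1 (1 + (jN : Int)) 1).foldl
      (fun cum j => PySem.List.pySetD cum j
        ((PySem.List.pyGetD cum (j - 1) PySem.Dict.empty).items.foldl
          (fun tgt rc => pvBump tgt (PySem.Int.mod (rc.1 + w j b) p) rc.2)
          (PySem.List.pyGetD cum j PySem.Dict.empty)))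
      ((List.range L).map (fun i => if i = 0 then pvCF p w i (b + 1) else pvCF p w i b))
    = (List.range L).map (fun i => if i ≤ jN then pvCF p w i (b + 1) else pvCF p w i b) := by
  intro jN
  induction jN with
  | zero =>
      intro _
      rw [PySem.List.pyRange_one_eq_nil (by norm_num : (1 + ((0:Nat) : Int)) ≤ 1), List.foldl_nil]
      apply List.map_congr_left
      intro i _
      by_cases h : i = 0 <;> simp [h]
  | succ n ih =>
      intro hL
      have hcast : (1 + ((n + 1 : Nat) : Int)) = (1 + (n : Int)) + 1 := by push_cast; ring
      rw [hcast, PySem.List.pyRange_one_succ_right (show (1:Int) ≤ 1 + (n : Int) by omega),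
        List.foldl_append, List.foldl_cons, List.foldl_nil, ih (by omega)]
      have hsrc : PySem.List.pyGetD ((List.range L).map (fun i => if i ≤ n then pvCF p w i (b + 1) else pvCF p w i b))
          ((1 + (n : Int)) - 1) PySem.Dict.empty = pvCF p w n (b + 1) := by
        rw [show (1 + (n : Int)) - 1 = (n : Int) by ring,
          pv_get_map_range L _ (n : Int) (by positivity) (by exact_mod_cast Nat.lt_of_succ_lt hL) _]
        simp
      have htgt : PySem.List.pyGetD ((List.range L).map (fun i => if i ≤ n then pvCF p w i (b + 1) else pvCF p w i b))
          (1 + (n : Int)) PySem.Dict.empty = pvCF p w (n + 1) b := by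
        rw [show (1 + (n : Int)) = ((n + 1 : Nat) : Int) by push_cast; ring,
          pv_get_map_range L _ _ (by positivity) (by exact_mod_cast hL) _]
        simp
      rw [hsrc, htgt]
      have hfold : (pvCF p w n (b + 1)).items.foldl
          (fun tgt rc => pvBump tgt (PySem.Int.mod (rc.1 + w (1 + (n : Int)) b) p) rc.2)
          (pvCF p w (n + 1) b) = pvCF p w (n + 1) (b + 1) := by
        have h1 : (pvCF p w n (b + 1)).items.foldl
            (fun tgt rc => pvBump tgt (PySem.Int.mod (rc.1 + w (1 + (n : Int)) b) p) rc.2)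
            (pvCF p w (n + 1) b)
            = pvAct (pvShiftL p (w (1 + (n : Int)) b) (pvCF p w n (b + 1)).items) (pvCF p w (n + 1) b) := by
          unfold pvShiftL pvAct
          rw [List.foldl_map]
        rw [h1, ← pv_merge_counter, ← show w ((n : Int) + 1) b = w (1 + (n : Int)) b by ring_nf,
          ← pvTF_succ p w n b, (pvCF_succ p w (n + 1) b hb).symm]
      rw [hfold, PySem.List.pySetD_of_nonneg _ _ (by positivity),
        show (1 + (n : Int)).toNat = n + 1 by omega,
        pv_set_map_range L _ (n + 1) _]
      apply List.map_congr_left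
      intro i _
      by_cases h : i = n + 1
      · simp [h]
      · have : (i ≤ n + 1) ↔ (i ≤ n) := by omega
        simp [h, this]


lemma pvB_range_bridge (k : Int) (hk : 1 ≤ k) :
    PySem.List.pyRange 1 (k - 1) 1 = PySem.List.pyRange 1 (1 + (((k - 2).toNat : Nat) : Int)) 1 := by
  by_cases h2 : 2 ≤ k
  · congr 1
    omega
  · have hk1 : k = 1 := by omega
    subst hk1
    rw [PySem.List.pyRange_one_eq_nil (by norm_num), PySem.List.pyRange_one_eq_nil (by norm_num)]

lemma pvB_outer (p : Int) (w : Int → Int → Int) (k : Int) (hk : 1 ≤ k) (L : Nat)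
    (hL : L = (k - 2).toNat + 1) :
    ∀ mN : Nat,
    (PySem.List.pyRange 0 (mN : Int) 1).foldl
      (fun cum b =>
        (PySem.List.pyRange 1 (k - 1) 1).foldl
          (fun cum j => PySem.List.pySetD cum j
            ((PySem.List.pyGetD cum (j - 1) PySem.Dict.empty).items.foldl
              (fun tgt rc => pvBump tgt (PySem.Int.mod (rc.1 + w j b) p) rc.2)
              (PySem.List.pyGetD cum j PySem.Dict.empty)))
          (PySem.List.pySetD cum 0 (pvBump (PySem.List.pyGetD cum 0 PySem.Dict.empty) (w 0 b) 1)))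
      ((List.range L).map (fun i => pvCF p w i 0))
    = (List.range L).map (fun i => pvCF p w i (mN : Int)) := by
  intro mN
  have hL0 : 0 < L := by omega
  induction mN with
  | zero =>
      rw [show PySem.List.pyRange 0 (((0:Nat)) : Int) 1 = [] from
        PySem.List.pyRange_one_eq_nil (by norm_num), List.foldl_nil, Nat.cast_zero]
  | succ m ih =>
      have hcast : ((m + 1 : Nat) : Int) = (m : Int) + 1 := by push_cast; ring
      rw [hcast, PySem.List.pyRange_one_succ_right (show (0:Int) ≤ (m : Int) by positivity),
        List.foldl_append, List.foldl_cons, List.foldl_nil, ih]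
      -- the seed at b = m
      have hget0 : PySem.List.pyGetD ((List.range L).map (fun i => pvCF p w i (m : Int))) 0 PySem.Dict.empty
          = pvCF p w 0 (m : Int) := by
        rw [pv_get_map_range L _ 0 (le_refl 0) (by exact_mod_cast hL0) _]
        rfl
      have hseed : pvBump (pvCF p w 0 (m : Int)) (w 0 (m : Int)) 1 = pvCF p w 0 ((m : Int) + 1) := by
        rw [pvCF_succ p w 0 (m : Int) (by positivity)]
        exact (pv_merge_single _ _).symm
      rw [hget0, hseed, PySem.List.pySetD_of_nonneg _ _ (le_refl 0),
        show ((0 : Int)).toNat = 0 from rfl, pv_set_map_range L _ 0 _]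
      have hstart : ((List.range L).map (fun i => if i = 0 then pvCF p w 0 ((m : Int) + 1) else pvCF p w i (m : Int)))
          = ((List.range L).map (fun i => if i = 0 then pvCF p w i ((m : Int) + 1) else pvCF p w i (m : Int))) := by
        apply List.map_congr_left
        intro i _
        by_cases h : i = 0 <;> simp [h]
      rw [hstart, pvB_range_bridge k hk,
        pvB_inner p w (m : Int) (by positivity) L ((k - 2).toNat) (by omega)]
      apply List.map_congr_left
      intro i hi
      have := List.mem_range.mp hi
      rw [if_pos (by omega : i ≤ (k - 2).toNat)]


-- assembling the ports --------------------------------------------------------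

-- the common weight function: w j b = (coeff[j] * pow2[b]) % p
def pvW (k p top : Int) : Int → Int → Int := fun j b =>
  PySem.Int.mod
    (PySem.List.pyGetD ((PySem.List.pyRange 0 k 1).map (fun j => PySem.Int.powMod 3 (k - 1 - j).toNat p)) j 0 *
     PySem.List.pyGetD ((PySem.List.pyRange 0 (top + 1) 1).map (fun b => PySem.Int.powMod 2 b.toNat p)) b 0) p

-- the common canonical result of both ports
def pvOut (k p top : Int) : List (Int × Int) :=
  (pvAct (pvShiftL p (pvW k p top (k - 1) top)
    (pvCF p (pvW k p top) ((k - 2).toNat) (top + 1)).items) PySem.Dict.empty).items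

lemma pvCF_zero (p : Int) (w : Int → Int → Int) (i : Nat) : pvCF p w i 0 = PySem.Dict.empty := by
  unfold pvCF
  rw [PySem.List.pyRange_one_eq_nil (le_refl 0), List.foldl_nil]

lemma pvPortA_eq (k S p top : Int) (hk : 1 ≤ k) (htop : 0 ≤ top) :
    dp_all_sums_mod_p k S p top = pvOut k p top := by
  have hmN : (((top + 1).toNat : Nat) : Int) = top + 1 := Int.toNat_of_nonneg (by omega)
  simp only [dp_all_sums_mod_p]
  -- the re-init loop
  have h0 := pvA_init (fun b =>
    PySem.Int.mod
      (PySem.List.pyGetD ((PySem.List.pyRange 0 k 1).map (fun j => PySem.Int.powMod 3 (k - 1 - j).toNat p)) 0 0 *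
       PySem.List.pyGetD ((PySem.List.pyRange 0 (top + 1) 1).map (fun b => PySem.Int.powMod 2 b.toNat p)) b 0) p)
    ((top + 1).toNat)
  rw [hmN] at h0
  have h0' : ((PySem.List.pyRange 0 (top + 1) 1).foldl
      (fun d b => d.insert b (pvBump (d.getD b PySem.Dict.empty)
        (PySem.Int.mod
          (PySem.List.pyGetD ((PySem.List.pyRange 0 k 1).map (fun j => PySem.Int.powMod 3 (k - 1 - j).toNat p)) 0 0 *
           PySem.List.pyGetD ((PySem.List.pyRange 0 (top + 1) 1).map (fun b => PySem.Int.powMod 2 b.toNat p)) b 0) p) 1))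
      PySem.Dict.empty).items
      = (PySem.List.pyRange 0 (top + 1) 1).map (fun b => (b, pvTF p (pvW k p top) 0 b)) := by
    rw [h0]
    rfl
  -- the j-loop
  have HA := pvA_outer p (pvW k p top) top htop _ h0' ((k - 2).toNat)
  simp only [pvW] at HA
  rw [pvB_range_bridge k hk]
  rw [show ∀ d : PySem.Dict Int (PySem.Dict Int Int), d.values = d.items.map Prod.snd from fun _ => rfl]
  rw [HA, List.map_map]
  -- total = pvCF, final = pvAct ∘ pvShiftL
  simp only [Function.comp_def, List.foldl_map, pvOut, pvAct, pvShiftL, pvW, pvCF]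

lemma pvPortB_eq (k S p top : Int) (hk : 1 ≤ k) (htop : 0 ≤ top) :
    dp_all_sums_mod_p_alt k S p top = pvOut k p top := by
  have hmN : (((top + 1).toNat : Nat) : Int) = top + 1 := Int.toNat_of_nonneg (by omega)
  have hL : (max (k - 1) 1).toNat = (k - 2).toNat + 1 := by omega
  simp only [dp_all_sums_mod_p_alt]
  -- initial cum = levels × empty = levels × pvCF i 0
  have hinit : (PySem.List.pyRange 0 (max (k - 1) 1) 1).map
      (fun _ => (PySem.Dict.empty : PySem.Dict Int Int))
      = (List.range ((k - 2).toNat + 1)).map (fun i => pvCF p (pvW k p top) i 0) := by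
    rw [PySem.List.pyRange_one, List.map_map]
    simp only [Int.sub_zero, hL]
    apply List.map_congr_left
    intro i _
    rw [pvCF_zero]
    rfl
  rw [hinit]
  -- the outer loop
  have HB := pvB_outer p (pvW k p top) k hk ((k - 2).toNat + 1) rfl ((top + 1).toNat)
  rw [hmN] at HB
  simp only [pvW] at HB
  rw [HB]
  -- last = pvCF lv (top+1), final = pvAct ∘ pvShiftL
  have hlast : PySem.List.pyGetD
      ((List.range ((k - 2).toNat + 1)).map (fun i => pvCF p (pvW k p top) i (top + 1)))
      (max (k - 2) 0) PySem.Dict.empty = pvCF p (pvW k p top) ((k - 2).toNat) (top + 1) := by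
    rw [pv_get_map_range _ _ _ (by positivity) (by
      have : (max (k - 2) 0) = (((k - 2).toNat : Nat) : Int) := by omega
      rw [this]; exact_mod_cast Nat.lt_succ_self _) _]
    congr 1
    omega
  rw [hlast]
  simp only [pvOut, pvAct, pvShiftL, pvW, List.foldl_map]

-- ===== VERDICT (by name: the statement is the Claim_ definition above) =====
theorem dp_all_sums_mod_p_spec : Claim_equal_dp_all_sums_mod_p := by
  intro k S p top _ hpre
  obtain ⟨hk, htop, _⟩ := hpre
  unfold Spec_dp_all_sums_mod_p
  rw [pvPortA_eq k S p top hk htop, pvPortB_eq k S p top hk htop]
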